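-- pv_equiv track=rewrite | github.com/iinteger/Codingtest | Programmers/level 2/더 맵게.py | solution
-- ===== SOURCE A (Python) =====
-- import heapq
--
-- def solution(scoville, K):
--     answer = 0
--     heapq.heapify(scoville)
--
--     while scoville[0] < K and len(scoville) > 1:  # 가장 작은 스코빌이 K이상이면 루프x
--         mixed = heapq.heappop(scoville) + heapq.heappop(scoville) * 2
--         answer += 1
--
--         heapq.heappush(scoville, mixed)
--
--     if scoville[0] < K:
--         return -1
--
--     return answer
-- ===== SOURCE B (Python) =====
-- def solution(scoville, K):
--     # sorted-list version: sort once, pop the two smallest from the front,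
--     # reinsert the mix at its sorted position (linear insertion)
--     answer = 0
--     scoville.sort()
--     while scoville[0] < K and len(scoville) > 1:
--         a = scoville.pop(0)
--         b = scoville.pop(0)
--         mixed = a + b * 2
--         i = 0
--         while i < len(scoville) and scoville[i] < mixed:
--             i += 1
--         scoville.insert(i, mixed)
--         answer += 1
--     if scoville[0] < K:
--         return -1
--     return answer
-- ===== Notes on version B (the rewrite author's own statement) =====
-- stated objective: simpler
-- what changed: Replaces the binary heap with a list sorted once up front: the two smallest values are popped from the front and the mix is reinserted at its sorted position, so heapify/heappush/heappop disappear.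
import Mathlib
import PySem

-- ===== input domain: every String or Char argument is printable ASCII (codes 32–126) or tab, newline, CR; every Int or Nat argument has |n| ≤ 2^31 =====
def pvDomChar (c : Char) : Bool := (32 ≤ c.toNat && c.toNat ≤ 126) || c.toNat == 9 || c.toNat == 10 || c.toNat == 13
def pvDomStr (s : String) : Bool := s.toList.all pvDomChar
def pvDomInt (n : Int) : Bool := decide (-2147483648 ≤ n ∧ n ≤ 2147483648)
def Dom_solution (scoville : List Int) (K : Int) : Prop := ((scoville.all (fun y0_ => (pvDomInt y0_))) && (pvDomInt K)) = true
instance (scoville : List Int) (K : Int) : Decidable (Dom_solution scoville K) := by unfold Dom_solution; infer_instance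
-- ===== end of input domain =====

-- A counts heap mixes until every scoville ≥ K; B keeps a sorted list (pop front twice, linear
-- sorted reinsert) instead of a heap — return value only: both mutate scoville in place, and the
-- final element order of the mutated list differs (heap order vs sorted order).


-- ===== PORT A =====
-- heapq is ported by its observable behaviour on the heap's value multiset: after heapify,
-- scoville[0] is the minimum, heappop removes and returns the minimum, heappush adds the value.
-- (The internal array layout of the CPython heap is not observable in A's return value.)
def heapMin : List Int → Int
  | [] => 0          -- unreachable under Pre_solution (Python: IndexError on scoville[0])
  | x :: xs => xs.foldl min x

-- the while loop; fuel = initial length (each iteration shrinks the heap by one element)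
def solutionLoop (K : Int) : Nat → List Int → Int → Int
  | 0, heap, answer => if heapMin heap < K then -1 else answer
  | fuel + 1, heap, answer =>
      if heapMin heap < K ∧ heap.length > 1 then
        let a := heapMin heap            -- mixed = heapq.heappop(scoville) + heapq.heappop(scoville) * 2
        let h1 := heap.erase a
        let b := heapMin h1
        let h2 := h1.erase b
        solutionLoop K fuel (h2 ++ [a + b * 2]) (answer + 1)   -- heapq.heappush(scoville, mixed)
      else if heapMin heap < K then -1 else answer

def solution (scoville : List Int) (K : Int) : Int :=
  solutionLoop K scoville.length scoville 0

-- ===== PORT B =====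
-- the inner while of Source B: walk past the elements < x, insert x there
def insortLin (x : Int) : List Int → List Int
  | [] => [x]
  | y :: ys => if y < x then y :: insortLin x ys else x :: y :: ys

def solutionAltLoop (K : Int) : Nat → List Int → Int → Int
  | 0, s, answer => if s.headD 0 < K then -1 else answer
  | fuel + 1, s, answer =>
      if s.headD 0 < K ∧ s.length > 1 then
        match s with
        | a :: b :: rest => solutionAltLoop K fuel (insortLin (a + b * 2) rest) (answer + 1)
        | _ => answer    -- unreachable: the guard has len(scoville) > 1
      else if s.headD 0 < K then -1 else answer

def solution_alt (scoville : List Int) (K : Int) : Int :=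
  -- scoville.sort(), then the while loop on the sorted list
  solutionAltLoop K (PySem.List.sorted scoville (fun x => x) false).length
    (PySem.List.sorted scoville (fun x => x) false) 0

-- ===== PRECONDITION & SPEC =====
-- Pre_ excludes only the empty list, on which Python A raises IndexError at scoville[0].
def Pre_solution (scoville : List Int) (K : Int) : Prop := scoville ≠ []
instance (scoville : List Int) (K : Int) : Decidable (Pre_solution scoville K) := by
  unfold Pre_solution; infer_instance

def pvWitness_solution : List Int × Int := ([1, 2, 9], 7)

def Spec_solution (scoville : List Int) (K : Int) (out : Int) : Prop := out = solution_alt scoville K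
instance (scoville : List Int) (K : Int) (out : Int) : Decidable (Spec_solution scoville K out) := by
  unfold Spec_solution; infer_instance

-- ===== CLAIM (what is proved, stated in full; the proofs are below) =====
def Claim_equal_solution : Prop := ∀ (scoville : List Int) (K : Int), Dom_solution scoville K → Pre_solution scoville K → Spec_solution scoville K (solution scoville K)

-- ===== LEMMAS AND PROOFS =====

theorem foldl_min_le (xs : List Int) (x : Int) : ∀ y ∈ x :: xs, xs.foldl min x ≤ y := by
  induction xs generalizing x with
  | nil => intro y hy; simp at hy; simp [hy]
  | cons z zs ih =>
      intro y hy
      have hbase : List.foldl min (min x z) zs ≤ min x z := ih (min x z) (min x z) (by simp)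
      simp only [List.foldl_cons]
      rcases List.mem_cons.mp hy with rfl | hy
      · exact hbase.trans (min_le_left _ _)
      · rcases List.mem_cons.mp hy with rfl | hy
        · exact hbase.trans (min_le_right _ _)
        · exact ih (min x z) y (List.mem_cons_of_mem _ hy)

theorem foldl_min_mem (xs : List Int) (x : Int) : xs.foldl min x ∈ x :: xs := by
  induction xs generalizing x with
  | nil => simp
  | cons z zs ih =>
      simp only [List.foldl_cons]
      rcases List.mem_cons.mp (ih (min x z)) with h | h
      · rcases min_choice x z with hm | hm
        · rw [h, hm]; exact List.mem_cons_self
        · rw [h, hm]; exact List.mem_cons_of_mem _ List.mem_cons_self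
      · exact List.mem_cons_of_mem _ (List.mem_cons_of_mem _ h)

-- on a heap that is a permutation of a sorted list, the root (= minimum) is the sorted head
theorem heapMin_eq_head (l : List Int) (x : Int) (t : List Int)
    (hp : l.Perm (x :: t)) (hs : (x :: t).Pairwise (· ≤ ·)) : heapMin l = x := by
  cases l with
  | nil => exact absurd hp.symm (by simp)
  | cons a as =>
      have hmem : (as.foldl min a) ∈ x :: t := hp.mem_iff.mp (foldl_min_mem as a)
      have hx : x ∈ a :: as := hp.mem_iff.mpr List.mem_cons_self
      have hle : as.foldl min a ≤ x := foldl_min_le as a x hx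
      have hge : x ≤ as.foldl min a := by
        rcases List.mem_cons.mp hmem with h | h
        · exact le_of_eq h.symm
        · exact (List.pairwise_cons.mp hs).1 _ h
      exact le_antisymm hle hge

theorem heapMin_eq_headD (l s : List Int) (hp : l.Perm s) (hs : s.Pairwise (· ≤ ·)) :
    heapMin l = s.headD 0 := by
  cases s with
  | nil => have : l = [] := hp.eq_nil; simp [this, heapMin]
  | cons x t => simpa using heapMin_eq_head l x t hp hs

theorem insortLin_eq_orderedInsert (x : Int) (l : List Int) :
    insortLin x l = List.orderedInsert (· ≤ ·) x l := by
  induction l with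
  | nil => rfl
  | cons y ys ih =>
      by_cases h : y < x
      · simp [insortLin, List.orderedInsert, h, not_le.mpr h, ih]
      · simp [insortLin, List.orderedInsert, h, not_lt.mp h]

theorem insortLin_perm (x : Int) (l : List Int) : (insortLin x l).Perm (x :: l) := by
  rw [insortLin_eq_orderedInsert]
  exact List.perm_orderedInsert _ _ _

theorem insortLin_pairwise (x : Int) (l : List Int) (hs : l.Pairwise (· ≤ ·)) :
    (insortLin x l).Pairwise (· ≤ ·) := by
  rw [insortLin_eq_orderedInsert]
  exact List.Pairwise.orderedInsert x l hs

-- the two loops agree whenever A's heap and B's sorted list hold the same multiset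
theorem loop_eq (K : Int) : ∀ (fuel : Nat) (l s : List Int) (ans : Int),
    l.Perm s → s.Pairwise (· ≤ ·) →
    solutionLoop K fuel l ans = solutionAltLoop K fuel s ans := by
  intro fuel
  induction fuel with
  | zero =>
      intro l s ans hp hs
      simp only [solutionLoop, solutionAltLoop, heapMin_eq_headD l s hp hs]
  | succ n ih =>
      intro l s ans hp hs
      have hmin := heapMin_eq_headD l s hp hs
      have hlen := hp.length_eq
      have hcond : (heapMin l < K ∧ l.length > 1) ↔ (s.headD 0 < K ∧ s.length > 1) := by
        rw [hmin, hlen]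
      by_cases hc : s.headD 0 < K ∧ s.length > 1
      · obtain ⟨a, b, rest, rfl⟩ : ∃ a b rest, s = a :: b :: rest := by
          match s, hc.2 with
          | a :: b :: rest, _ => exact ⟨a, b, rest, rfl⟩
        have ha : heapMin l = a := heapMin_eq_head l a (b :: rest) hp hs
        have hp1 : (l.erase a).Perm (b :: rest) := by
          have := hp.erase a
          simpa using this
        have hs1 : (b :: rest).Pairwise (· ≤ ·) := (List.pairwise_cons.mp hs).2
        have hb : heapMin (l.erase a) = b := heapMin_eq_head _ b rest hp1 hs1
        have hp2 : ((l.erase a).erase b).Perm rest := by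
          have := hp1.erase b
          simpa using this
        simp only [solutionLoop, solutionAltLoop]
        rw [if_pos (hcond.mpr hc), if_pos hc]
        simp only [ha, hb]
        apply ih
        · refine ((hp2.append_right _).trans ?_).trans (insortLin_perm _ _).symm
          exact List.perm_append_singleton _ _
        · exact insortLin_pairwise _ _ ((List.pairwise_cons.mp hs1).2)
      · simp only [solutionLoop, solutionAltLoop]
        rw [if_neg (fun h => hc (hcond.mp h)), if_neg hc, hmin]

-- ===== VERDICT (by name: the statement is the Claim_ definition above) =====
theorem solution_spec : Claim_equal_solution := by
  intro scoville K _ _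
  unfold Spec_solution solution solution_alt
  have hp : (PySem.List.sorted scoville (fun x => x) false).Perm scoville := PySem.List.sorted_perm ..
  rw [hp.length_eq]
  exact loop_eq K scoville.length scoville _ 0 hp.symm
    (by simpa using PySem.List.sorted_pairwise (xs := scoville) (key := fun x : Int => x))
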